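-- pv_equiv track=rewrite | github.com/ajoshi03992-lgtm/CyberShieldAI | phishing_detection.py | detect_phishing
-- ===== SOURCE A (Python) =====
-- phishing_keywords = [
-- "verify your account",
-- "update your account",
-- "login immediately",
-- "suspended account",
-- "click here to verify",
-- "security alert",
-- "unusual activity",
-- "confirm your identity",
-- "reset password now"
-- ]
--
-- def detect_phishing(msg):
--
--     msg = msg.lower()
--
--     for word in phishing_keywords:
--         if word in msg:
--             return True
--
--     suspicious_domains = [
--     ".ru",".tk",".xyz",".top",".gq"
--     ]
--
--     for d in suspicious_domains:
--         if d in msg: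
--             return True
--
--     return False
-- ===== SOURCE B (Python) =====
-- phishing_keywords = [
-- "verify your account",
-- "update your account",
-- "login immediately",
-- "suspended account",
-- "click here to verify",
-- "security alert",
-- "unusual activity",
-- "confirm your identity",
-- "reset password now"
-- ]
--
-- PHISHING_PATTERNS = phishing_keywords + [".ru", ".tk", ".xyz", ".top", ".gq"]
--
-- def detect_phishing(msg):
--     msg = msg.lower()
--     # single left-to-right scan over the message: at each position, test
--     # whether any pattern (keyword or suspicious domain) starts there
--     return any(
--         msg.startswith(p, i)
--         for i in range(len(msg) + 1)
--         for p in PHISHING_PATTERNS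
--     )
-- ===== Notes on version B (the rewrite author's own statement) =====
-- stated objective: alternative
-- what changed: Replaces A's per-pattern substring searches (one scan of the message for each keyword/domain) by a single left-to-right scan over the message that tests every pattern for a prefix match at each position, over one merged pattern list.
import Mathlib
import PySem

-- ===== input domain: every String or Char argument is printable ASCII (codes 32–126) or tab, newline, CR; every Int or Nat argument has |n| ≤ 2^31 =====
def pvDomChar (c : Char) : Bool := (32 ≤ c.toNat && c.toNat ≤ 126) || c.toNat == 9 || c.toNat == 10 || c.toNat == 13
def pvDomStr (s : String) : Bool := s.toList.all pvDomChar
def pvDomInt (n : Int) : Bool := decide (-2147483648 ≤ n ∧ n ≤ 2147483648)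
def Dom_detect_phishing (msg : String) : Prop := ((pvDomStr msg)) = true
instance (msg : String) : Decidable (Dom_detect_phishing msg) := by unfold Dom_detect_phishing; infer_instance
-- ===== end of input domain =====

-- B replaces A's per-pattern substring scans by one left-to-right scan over the
-- message testing all patterns at each position (objective: alternative, same result).

-- ===== PORT A =====
def phishing_keywords : List String :=
  ["verify your account", "update your account", "login immediately",
   "suspended account", "click here to verify", "security alert",
   "unusual activity", "confirm your identity", "reset password now"]

def detect_phishing (msg : String) : Bool :=
  let m := PySem.Chars.lower msg.toList
  -- first loop with early return True = List.any over the keywords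
  if phishing_keywords.any (fun word => PySem.Chars.isIn word.toList m) then true
  else
    let suspicious_domains : List String := [".ru", ".tk", ".xyz", ".top", ".gq"]
    -- second loop with early return True
    if suspicious_domains.any (fun d => PySem.Chars.isIn d.toList m) then true
    else false

-- ===== PORT B =====
def PHISHING_PATTERNS : List String :=
  phishing_keywords ++ [".ru", ".tk", ".xyz", ".top", ".gq"]

def detect_phishing_alt (msg : String) : Bool :=
  let m := PySem.Chars.lower msg.toList
  -- any(msg.startswith(p, i) for i in range(len(msg)+1) for p in PHISHING_PATTERNS)
  (List.range (m.length + 1)).any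
    (fun i => PHISHING_PATTERNS.any (fun p => PySem.Chars.startswith (m.drop i) p.toList))

-- ===== PRECONDITION & SPEC =====
def Spec_detect_phishing (msg : String) (out : Bool) : Prop := out = detect_phishing_alt msg
instance (msg : String) (out : Bool) : Decidable (Spec_detect_phishing msg out) := by unfold Spec_detect_phishing; infer_instance

-- ===== CLAIM (what is proved, stated in full; the proofs are below) =====
def Claim_equal_detect_phishing : Prop := ∀ (msg : String), Dom_detect_phishing msg → Spec_detect_phishing msg (detect_phishing msg)

-- ===== LEMMAS AND PROOFS =====

-- position-wise prefix scan over the whole message finds exactly the substrings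
lemma scan_eq_isIn (p m : List Char) :
    ((List.range (m.length + 1)).any (fun i => PySem.Chars.startswith (m.drop i) p))
      = PySem.Chars.isIn p m := by
  rw [Bool.eq_iff_iff]
  simp only [List.any_eq_true, List.mem_range, PySem.Chars.startswith_iff]
  rw [← PySem.Chars.exists_prefix_drop_iff_isIn]
  constructor
  · rintro ⟨i, _, hi⟩; exact ⟨i, hi⟩
  · rintro ⟨j, hj⟩
    by_cases hle : j ≤ m.length
    · exact ⟨j, by omega, hj⟩
    · have hnil : m.drop j = [] := List.drop_eq_nil_of_le (by omega)
      have hp : p = [] := List.prefix_nil.mp (hnil ▸ hj)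
      exact ⟨m.length, by omega, by simp [hp]⟩

theorem detect_phishing_spec : Claim_equal_detect_phishing := by
  intro msg _
  unfold Spec_detect_phishing detect_phishing detect_phishing_alt
  set m := PySem.Chars.lower msg.toList with hm
  -- swap the two 'any's, collapse the position scan to isIn, split the append
  have hswap :
      ((List.range (m.length + 1)).any
        (fun i => PHISHING_PATTERNS.any (fun p => PySem.Chars.startswith (m.drop i) p.toList)))
        = PHISHING_PATTERNS.any
            (fun p => (List.range (m.length + 1)).any
              (fun i => PySem.Chars.startswith (m.drop i) p.toList)) := by
    rw [Bool.eq_iff_iff]; simp only [List.any_eq_true]; tauto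
  rw [hswap]
  have hcoll : PHISHING_PATTERNS.any
      (fun p => (List.range (m.length + 1)).any
        (fun i => PySem.Chars.startswith (m.drop i) p.toList))
      = PHISHING_PATTERNS.any (fun p => PySem.Chars.isIn p.toList m) := by
    simp only [scan_eq_isIn]
  rw [hcoll]
  unfold PHISHING_PATTERNS
  rw [List.any_append]
  cases hk : phishing_keywords.any (fun w => PySem.Chars.isIn w.toList m) <;>
    cases hd : ([".ru", ".tk", ".xyz", ".top", ".gq"] : List String).any
        (fun d => PySem.Chars.isIn d.toList m) <;>
    simp [hk, hd]
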